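-- pv_equiv track=rewrite | github.com/Arzuparreta/brain | brain/links/normalize.py | extract_normalized_words
-- ===== SOURCE A (Python) =====
-- import unicodedata
--
-- def extract_normalized_words(text: str) -> list[str]:
--     out: list[str] = []
--     buf: list[str] = []
--     for ch in text:
--         if unicodedata.category(ch).startswith("L"):
--             buf.append(ch)
--         else:
--             if buf:
--                 out.append("".join(buf).casefold())
--                 buf = []
--     if buf:
--         out.append("".join(buf).casefold())
--     return out
-- ===== SOURCE B (Python) =====
-- import unicodedata
--
--
-- def extract_normalized_words(text: str) -> list[str]:
--     # Map every non-letter character to a space, then casefold once and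
--     # let str.split() do the run segmentation.
--     cleaned = "".join(
--         ch if unicodedata.category(ch).startswith("L") else " " for ch in text
--     )
--     return cleaned.casefold().split()
-- ===== Notes on version B (the rewrite author's own statement) =====
-- stated objective: idiomatic
-- what changed: Replaces A's explicit buffer-and-flush loop by a map of every non-letter character to a space followed by a single casefold of the whole string and str.split(), which does the run segmentation.
import Mathlib
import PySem

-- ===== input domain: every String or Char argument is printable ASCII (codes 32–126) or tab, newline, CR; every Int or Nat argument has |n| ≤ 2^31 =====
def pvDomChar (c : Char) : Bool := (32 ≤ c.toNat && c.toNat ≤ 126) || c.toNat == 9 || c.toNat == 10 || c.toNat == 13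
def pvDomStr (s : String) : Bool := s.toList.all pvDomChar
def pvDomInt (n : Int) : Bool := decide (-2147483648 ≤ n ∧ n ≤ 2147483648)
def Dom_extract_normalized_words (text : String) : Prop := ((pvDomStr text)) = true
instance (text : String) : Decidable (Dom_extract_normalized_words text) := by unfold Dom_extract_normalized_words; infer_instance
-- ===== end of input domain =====

-- B replaces A's explicit buffer/flush loop by map-to-space + casefold + split() (idiomatic decomposition).

-- unicodedata.category(ch).startswith("L"): on the ASCII domain the category-L characters
-- are exactly the ASCII letters, so this test is PySem.Chars.isalpha there (exact on Dom).
def pvCatLetter (c : Char) : Bool := PySem.Chars.isalpha c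

-- ===== PORT A =====
-- str.casefold() coincides with str.lower() on the ASCII domain: ported as PySem.Chars.lower (exact on Dom).
def extract_normalized_words (text : String) : List String :=
  let fin := text.toList.foldl
    (fun (s : List String × List Char) ch =>
      if pvCatLetter ch then (s.1, s.2 ++ [ch])
      else if s.2.isEmpty then s
      else (s.1 ++ [String.ofList (PySem.Chars.lower s.2)], []))
    ([], [])
  if fin.2.isEmpty then fin.1
  else fin.1 ++ [String.ofList (PySem.Chars.lower fin.2)]

-- ===== PORT B =====
def extract_normalized_words_alt (text : String) : List String :=
  let cleaned := String.ofList
    (text.toList.map (fun ch => if pvCatLetter ch then ch else ' '))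
  PySem.Str.split₀ (PySem.Str.lower cleaned)

-- ===== PRECONDITION & SPEC =====
def Spec_extract_normalized_words (text : String) (out : List String) : Prop := out = extract_normalized_words_alt text
instance (text : String) (out : List String) : Decidable (Spec_extract_normalized_words text out) := by unfold Spec_extract_normalized_words; infer_instance

-- ===== CLAIM (what is proved, stated in full; the proofs are below) =====
def Claim_equal_extract_normalized_words : Prop := ∀ (text : String), Dom_extract_normalized_words text → Spec_extract_normalized_words text (extract_normalized_words text)

-- ===== LEMMAS AND PROOFS =====

-- the character transformation B applies before splitting
def pvF (c : Char) : Char :=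
  PySem.Chars.lowerChar (if pvCatLetter c then c else ' ')

lemma pvF_letter {c : Char} (h : pvCatLetter c = true) :
    pvF c = PySem.Chars.lowerChar c := by
  simp [pvF, h]

lemma pvF_nonletter {c : Char} (h : pvCatLetter c = false) : pvF c = ' ' := by
  simp only [pvF, h, Bool.false_eq_true, if_false]
  decide

lemma letter_range {c : Char} (h : pvCatLetter c = true) :
    (65 ≤ c.toNat ∧ c.toNat ≤ 90) ∨ (97 ≤ c.toNat ∧ c.toNat ≤ 122) := by
  simp only [pvCatLetter, PySem.Chars.isalpha, PySem.Chars.isupper, PySem.Chars.islower,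
    Bool.or_eq_true, Bool.and_eq_true, decide_eq_true_eq, Char.le_def] at h
  rcases h with ⟨h1, h2⟩ | ⟨h1, h2⟩ <;> [left; right] <;>
    exact ⟨UInt32.le_iff_toNat_le.mp h1, UInt32.le_iff_toNat_le.mp h2⟩

lemma isspace_of_range {c : Char} (h : 97 ≤ c.toNat ∧ c.toNat ≤ 122) :
    PySem.Chars.isspace c = false := by
  simp only [PySem.Chars.isspace, Bool.or_eq_false_iff, Bool.and_eq_false_iff,
    decide_eq_false_iff_not]
  omega

lemma isspace_lowerChar_of_letter {c : Char} (h : pvCatLetter c = true) :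
    PySem.Chars.isspace (PySem.Chars.lowerChar c) = false := by
  rcases letter_range h with h' | h'
  · have hup : PySem.Chars.isupper c = true := by
      simp only [PySem.Chars.isupper, Bool.and_eq_true, decide_eq_true_eq, Char.le_def]
      exact ⟨UInt32.le_iff_toNat_le.mpr h'.1, UInt32.le_iff_toNat_le.mpr h'.2⟩
    have hv : Nat.isValidChar (c.toNat + 32) := Or.inl (by omega)
    apply isspace_of_range
    simp only [PySem.Chars.lowerChar, hup, Char.toNat_ofNat, hv, if_pos]
    omega
  · have hup : PySem.Chars.isupper c = false := by
      simp only [PySem.Chars.isupper, Bool.and_eq_false_iff, decide_eq_false_iff_not, Char.le_def]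
      right
      intro hh
      have := UInt32.le_iff_toNat_le.mp hh
      have hz : ('Z'.val.toNat) = 90 := rfl
      have hc : c.toNat = c.val.toNat := rfl
      omega
    apply isspace_of_range
    simpa [PySem.Chars.lowerChar, hup] using h'

-- unfolding equations for PySem.Chars.split₀.go
lemma go_nil (cur : List Char) (acc : List (List Char)) :
    PySem.Chars.split₀.go [] cur acc =
      if cur.isEmpty then acc.reverse else (cur.reverse :: acc).reverse := rfl

lemma go_cons (c : Char) (rest cur : List Char) (acc : List (List Char)) :
    PySem.Chars.split₀.go (c :: rest) cur acc =
      if PySem.Chars.isspace c then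
        (if cur.isEmpty then PySem.Chars.split₀.go rest [] acc
         else PySem.Chars.split₀.go rest [] (cur.reverse :: acc))
      else PySem.Chars.split₀.go rest (c :: cur) acc := rfl

-- accumulator lemma for PySem.Chars.split₀.go
lemma split₀_go_acc (l : List Char) :
    ∀ (cur : List Char) (acc : List (List Char)),
      PySem.Chars.split₀.go l cur acc = acc.reverse ++ PySem.Chars.split₀.go l cur [] := by
  induction l with
  | nil =>
      intro cur acc
      by_cases h : cur.isEmpty <;> simp [go_nil, h]
  | cons c rest ih =>
      intro cur acc
      by_cases hs : PySem.Chars.isspace c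
      · by_cases hc : cur.isEmpty
        · simp only [go_cons, hs, hc, if_true]
          exact ih [] acc
        · simp only [go_cons, hs, hc, if_true, if_false, Bool.false_eq_true]
          rw [ih [] (cur.reverse :: acc), ih [] [cur.reverse]]
          simp
      · simp only [go_cons, hs, Bool.false_eq_true, if_false]
        exact ih (c :: cur) acc

-- A's loop step (definitionally the lambda inside port A)
def pvStep (s : List String × List Char) (ch : Char) : List String × List Char :=
  if pvCatLetter ch then (s.1, s.2 ++ [ch])
  else if s.2.isEmpty then s
  else (s.1 ++ [String.ofList (PySem.Chars.lower s.2)], [])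

-- heart of the proof: A's buffered loop equals split₀.go driven by the mapped characters
lemma pvMain (l : List Char) :
    ∀ (out : List String) (buf : List Char),
      (let fin := l.foldl pvStep (out, buf)
       if fin.2.isEmpty then fin.1
       else fin.1 ++ [String.ofList (PySem.Chars.lower fin.2)]) =
      out ++ (PySem.Chars.split₀.go (l.map pvF)
                ((PySem.Chars.lower buf).reverse) []).map String.ofList := by
  induction l with
  | nil =>
      intro out buf
      cases buf <;> simp [go_nil, PySem.Chars.lower]
  | cons c rest ih =>
      intro out buf
      by_cases hl : pvCatLetter c
      · have hns := isspace_lowerChar_of_letter hl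
        simp only [List.foldl_cons, pvStep, hl, if_true, List.map_cons, pvF_letter hl,
          go_cons, hns, Bool.false_eq_true, if_false]
        rw [ih out (buf ++ [c])]
        simp [PySem.Chars.lower]
      · have hsp : PySem.Chars.isspace (pvF c) = true := by
          rw [pvF_nonletter (by simpa using hl)]; decide
        simp only [List.foldl_cons, pvStep, hl, Bool.false_eq_true, if_false, List.map_cons,
          go_cons, hsp, if_true]
        by_cases hb : buf.isEmpty
        · have hbe : buf = [] := by simpa [List.isEmpty_iff] using hb
          subst hbe
          simp only [List.isEmpty_nil, if_true, PySem.Chars.lower, List.map_nil,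
            List.reverse_nil]
          exact ih out []
        · have hcur : ((PySem.Chars.lower buf).reverse).isEmpty = false := by
            cases buf with
            | nil => simp at hb
            | cons x xs => simp [PySem.Chars.lower]
          simp only [hb, if_false, hcur, Bool.false_eq_true, List.reverse_reverse]
          rw [ih (out ++ [String.ofList (PySem.Chars.lower buf)]) []]
          rw [split₀_go_acc _ [] [PySem.Chars.lower buf]]
          simp [PySem.Chars.lower]

-- ===== VERDICT (by name: the statement is the Claim_ definition above) =====
theorem extract_normalized_words_spec : Claim_equal_extract_normalized_words := by
  intro text _
  unfold Spec_extract_normalized_words extract_normalized_words extract_normalized_words_alt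
  have h := pvMain text.toList [] []
  have h2 : [] ++ (PySem.Chars.split₀.go (text.toList.map pvF)
      ((PySem.Chars.lower []).reverse) []).map String.ofList =
      PySem.Str.split₀ (PySem.Str.lower (String.ofList
        (text.toList.map (fun ch => if pvCatLetter ch then ch else ' ')))) := by
    simp only [PySem.Str.split₀, PySem.Chars.split₀, PySem.Chars.lower, List.map_nil,
      List.reverse_nil, List.nil_append, PySem.Str.toList_lower, String.toList_ofList,
      List.map_map]
    have hmap : List.map pvF text.toList =
        List.map (PySem.Chars.lowerChar ∘ fun ch => if pvCatLetter ch = true then ch else ' ')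
          text.toList := by
      simp [pvF, Function.comp_def]
    rw [hmap]
  exact h.trans h2
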